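-- pv_equiv track=rewrite | github.com/MateusCristoMelo/MIDIGenerator | src/10_infer_text_softprompt.py | make_primer_ids
-- ===== SOURCE A (Python) =====
-- def strip_ctrl_prefix(token_str_list):
--     i0 = 0
--     for t in token_str_list:
--         if isinstance(t, str) and t.startswith("<CTRL_"):
--             i0 += 1
--         else:
--             break
--     return token_str_list[i0:]
--
-- def make_primer_ids(row, tokens_idx, stoi, bars=8, tokens_override=0):
--     toks = strip_ctrl_prefix(tokens_idx.get(row["midi_path"], []))
--     if tokens_override and tokens_override > 0:
--         toks = toks[:tokens_override]
--     else:
--         out, b = [], 0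
--         for t in toks:
--             out.append(t)
--             if isinstance(t, str) and t.startswith("Bar"):
--                 b += 1
--                 if b >= bars: break
--         toks = out
--     return [stoi.get(t if isinstance(t, str) else str(t), 3) for t in toks]  # 3 = UNK_ID
-- ===== SOURCE B (Python) =====
-- def make_primer_ids(row, tokens_idx, stoi, bars=8, tokens_override=0):
--     ids = []
--     in_prefix = True
--     b = n = 0
--     for t in tokens_idx.get(row["midi_path"], []):
--         if in_prefix and isinstance(t, str) and t.startswith("<CTRL_"):
--             continue
--         in_prefix = False
--         ids.append(stoi.get(t if isinstance(t, str) else str(t), 3))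
--         n += 1
--         if tokens_override > 0:
--             if n >= tokens_override:
--                 break
--         elif isinstance(t, str) and t.startswith("Bar"):
--             b += 1
--             if b >= bars:
--                 break
--     return ids
-- ===== Notes on version B (the rewrite author's own statement) =====
-- stated objective: simpler
-- what changed: A builds the token list in three passes (strip leading control tokens via index+slice, truncate or collect with a bar counter, then a mapping comprehension); B is one fused traversal that latches off a prefix flag, maps each kept token to its id inline, and stops at the override length or the bars-th Bar token.
import Mathlib
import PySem

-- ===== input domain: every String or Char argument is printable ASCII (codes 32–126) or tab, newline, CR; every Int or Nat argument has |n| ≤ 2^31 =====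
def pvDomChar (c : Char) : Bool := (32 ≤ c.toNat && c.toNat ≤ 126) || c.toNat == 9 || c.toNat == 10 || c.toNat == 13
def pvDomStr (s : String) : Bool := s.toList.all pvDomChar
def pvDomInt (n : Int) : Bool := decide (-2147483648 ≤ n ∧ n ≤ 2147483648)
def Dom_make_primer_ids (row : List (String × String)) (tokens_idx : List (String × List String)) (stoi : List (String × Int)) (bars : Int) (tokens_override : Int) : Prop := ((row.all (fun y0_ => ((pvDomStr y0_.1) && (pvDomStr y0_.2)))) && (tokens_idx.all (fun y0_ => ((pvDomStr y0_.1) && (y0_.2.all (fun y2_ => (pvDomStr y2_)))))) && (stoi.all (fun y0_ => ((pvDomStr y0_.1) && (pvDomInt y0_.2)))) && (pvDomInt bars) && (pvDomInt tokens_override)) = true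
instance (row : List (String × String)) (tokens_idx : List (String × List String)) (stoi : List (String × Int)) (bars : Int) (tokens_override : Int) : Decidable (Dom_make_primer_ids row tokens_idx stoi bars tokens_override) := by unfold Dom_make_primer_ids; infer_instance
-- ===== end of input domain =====

-- B fuses A's strip/collect/map passes into a single traversal with a latching prefix flag.
-- Pre_ excludes rows without a "midi_path" key, on which Python A raises KeyError.

-- first-match association-list lookup with default (Python dict .get / [] on the dicts passed in)
def agetD {a : Type} (xs : List (String × a)) (k : String) (d : a) : a :=
  match xs with
  | [] => d
  | (k', v) :: rest => if k' = k then v else agetD rest k d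

-- ===== PORT A =====
-- i0 accumulation loop of strip_ctrl_prefix
def ctrlCount : List String → Nat
  | [] => 0
  | t :: rest => if PySem.Str.startswith t "<CTRL_" then ctrlCount rest + 1 else 0

def strip_ctrl_prefix (token_str_list : List String) : List String :=
  let i0 := ctrlCount token_str_list
  PySem.List.slice token_str_list (some (i0 : Int)) none

-- the bar-collecting loop of A (out.append; break once b reaches bars)
def barLoop (bars : Int) : List String → Int → List String
  | [], _ => []
  | t :: rest, b =>
    if PySem.Str.startswith t "Bar" then
      (if b + 1 ≥ bars then [t] else t :: barLoop bars rest (b + 1))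
    else t :: barLoop bars rest b

def make_primer_ids (row : List (String × String)) (tokens_idx : List (String × List String)) (stoi : List (String × Int)) (bars : Int) (tokens_override : Int) : List Int :=
  -- row["midi_path"] raises KeyError when absent: Pre_ excludes that; "" stands for the unreached case
  let toks0 := strip_ctrl_prefix (agetD tokens_idx (agetD row "midi_path" "") [])
  let toks :=
    if tokens_override ≠ 0 ∧ tokens_override > 0 then
      PySem.List.slice toks0 none (some tokens_override)
    else barLoop bars toks0 0
  toks.map (fun t => agetD stoi t 3)

-- ===== PORT B =====
-- the single fused loop of Source B: inPrefix latch, inline id mapping, override/bar stop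
def altLoop (stoi : List (String × Int)) (bars tokens_override : Int) : List String → Bool → Int → Int → List Int
  | [], _, _, _ => []
  | t :: rest, inPrefix, b, n =>
    if inPrefix && PySem.Str.startswith t "<CTRL_" then
      altLoop stoi bars tokens_override rest true b n
    else
      let id := agetD stoi t 3
      if tokens_override > 0 then
        (if n + 1 ≥ tokens_override then [id]
         else id :: altLoop stoi bars tokens_override rest false b (n + 1))
      else if PySem.Str.startswith t "Bar" then
        (if b + 1 ≥ bars then [id]
         else id :: altLoop stoi bars tokens_override rest false (b + 1) (n + 1))
      else id :: altLoop stoi bars tokens_override rest false b (n + 1)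

def make_primer_ids_alt (row : List (String × String)) (tokens_idx : List (String × List String)) (stoi : List (String × Int)) (bars : Int) (tokens_override : Int) : List Int :=
  altLoop stoi bars tokens_override (agetD tokens_idx (agetD row "midi_path" "") []) true 0 0

-- ===== PRECONDITION & SPEC =====
-- Pre_ excludes rows with no "midi_path" key: Python A raises KeyError there (B too).
def Pre_make_primer_ids (row : List (String × String)) (tokens_idx : List (String × List String)) (stoi : List (String × Int)) (bars : Int) (tokens_override : Int) : Prop :=
  "midi_path" ∈ row.map Prod.fst
instance (row : List (String × String)) (tokens_idx : List (String × List String)) (stoi : List (String × Int)) (bars : Int) (tokens_override : Int) : Decidable (Pre_make_primer_ids row tokens_idx stoi bars tokens_override) := by unfold Pre_make_primer_ids; infer_instance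

def pvWitness_make_primer_ids : (List (String × String)) × (List (String × List String)) × (List (String × Int)) × Int × Int :=
  ([("midi_path", "p")], [("p", ["<CTRL_A>", "Bar_None", "Note_60", "Bar_None"])], [("Bar_None", 5), ("Note_60", 7)], 1, 0)

def Spec_make_primer_ids (row : List (String × String)) (tokens_idx : List (String × List String)) (stoi : List (String × Int)) (bars : Int) (tokens_override : Int) (out : List Int) : Prop := out = make_primer_ids_alt row tokens_idx stoi bars tokens_override
instance (row : List (String × String)) (tokens_idx : List (String × List String)) (stoi : List (String × Int)) (bars : Int) (tokens_override : Int) (out : List Int) : Decidable (Spec_make_primer_ids row tokens_idx stoi bars tokens_override out) := by unfold Spec_make_primer_ids; infer_instance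

-- ===== CLAIM (what is proved, stated in full; the proofs are below) =====
def Claim_equal_make_primer_ids : Prop := ∀ (row : List (String × String)) (tokens_idx : List (String × List String)) (stoi : List (String × Int)) (bars : Int) (tokens_override : Int), Dom_make_primer_ids row tokens_idx stoi bars tokens_override → Pre_make_primer_ids row tokens_idx stoi bars tokens_override → Spec_make_primer_ids row tokens_idx stoi bars tokens_override (make_primer_ids row tokens_idx stoi bars tokens_override)

-- ===== LEMMAS AND PROOFS =====

-- skipping the latched prefix: altLoop from the start equals altLoop from the stripped suffix
theorem altLoop_drop_ctrl (stoi : List (String × Int)) (bars ov : Int) (xs : List String) :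
    altLoop stoi bars ov xs true 0 0 = altLoop stoi bars ov (xs.drop (ctrlCount xs)) true 0 0 := by
  
  induction xs with
  | nil => rfl
  | cons h t ih =>
    by_cases hc : PySem.Chars.startswith h.toList ['<', 'C', 'T', 'R', 'L', '_'] = true
    · simpa [altLoop, ctrlCount, pysem, hc] using ih
    · simp [ctrlCount, pysem, hc]

-- the head of the stripped list does not start with "<CTRL_"
theorem head_drop_ctrl (xs : List String) (h : String) (hs : List String)
    (he : xs.drop (ctrlCount xs) = h :: hs) :
    PySem.Chars.startswith h.toList ['<', 'C', 'T', 'R', 'L', '_'] = false := by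
  
  induction xs with
  | nil => simp at he
  | cons h' t ih =>
    by_cases hc : PySem.Chars.startswith h'.toList ['<', 'C', 'T', 'R', 'L', '_'] = true
    · refine ih ?_
      simpa [ctrlCount, pysem, hc] using he
    · have he' : h' = h := by
        simpa [ctrlCount, pysem, hc] using congrArg List.head? he
      rw [← he']
      simpa using hc

-- once the head is not a control token, the latch value is irrelevant
theorem altLoop_true_eq_false (stoi : List (String × Int)) (bars ov : Int) (xs : List String) (b n : Int)
    (hx : ∀ h hs, xs = h :: hs → PySem.Chars.startswith h.toList ['<', 'C', 'T', 'R', 'L', '_'] = false) :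
    altLoop stoi bars ov xs true b n = altLoop stoi bars ov xs false b n := by
  
  cases xs with
  | nil => rfl
  | cons h t =>
    simp [altLoop, hx h t rfl]

-- override mode: the fused loop is take-then-map
theorem altLoop_false_ov (stoi : List (String × Int)) (bars ov : Int) (hov : 0 < ov) :
    ∀ (xs : List String) (b n : Int), n < ov →
      altLoop stoi bars ov xs false b n = (xs.take (ov - n).toNat).map (fun t => agetD stoi t 3) := by
  
  intro xs
  induction xs with
  | nil => intro b n _; simp [altLoop]
  | cons t rest ih =>
    intro b n hn
    simp only [altLoop, Bool.false_and, Bool.false_eq_true, if_false, if_pos hov]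
    by_cases h1 : n + 1 ≥ ov
    · have h2 : (ov - n).toNat = 1 := by omega
      simp [h1, h2]
    · have h2 : (ov - n).toNat = (ov - (n + 1)).toNat + 1 := by omega
      simp [h1, h2, ih b (n + 1) (by omega)]

-- bar mode: the fused loop is A's barLoop followed by the map
theorem altLoop_false_bar (stoi : List (String × Int)) (bars ov : Int) (hov : ¬ 0 < ov) :
    ∀ (xs : List String) (b n : Int),
      altLoop stoi bars ov xs false b n = (barLoop bars xs b).map (fun t => agetD stoi t 3) := by
  
  intro xs
  induction xs with
  | nil => intro b n; simp [altLoop, barLoop]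
  | cons t rest ih =>
    intro b n
    simp only [altLoop, barLoop, Bool.false_and, Bool.false_eq_true, if_false, if_neg hov]
    by_cases hb : PySem.Chars.startswith t.toList ['B', 'a', 'r'] = true
    · by_cases h1 : b + 1 ≥ bars
      · simp [pysem, hb, h1]
      · simp [pysem, hb, h1, ih (b + 1) (n + 1)]
    · simp [pysem, hb, ih b (n + 1)]

-- ===== VERDICT (by name: the statement is the Claim_ definition above) =====
theorem make_primer_ids_spec : Claim_equal_make_primer_ids := by
  
  intro row tokens_idx stoi bars ov _ _
  unfold Spec_make_primer_ids make_primer_ids make_primer_ids_alt strip_ctrl_prefix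
  rw [altLoop_drop_ctrl,
      altLoop_true_eq_false stoi bars ov _ 0 0 (fun h hs he => head_drop_ctrl _ h hs he),
      PySem.List.slice_from_natCast]
  by_cases hov : 0 < ov
  · simp only [eq_true (show ov ≠ 0 ∧ ov > 0 from ⟨by omega, hov⟩), if_true]
    rw [PySem.List.slice_to _ (le_of_lt hov), altLoop_false_ov stoi bars ov hov _ 0 0 hov]
    norm_num
  · simp only [eq_false (show ¬(ov ≠ 0 ∧ ov > 0) by omega), if_false]
    rw [altLoop_false_bar stoi bars ov hov _ 0 0]
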